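-- pv_equiv track=rewrite | github.com/yangjiahao106/LeetCode | 周赛/LCS 03. 主题空间.py | largestArea
-- ===== SOURCE A (Python) =====
-- from typing import List
--
-- def largestArea(grid: List[str]) -> int:
--     for i, row in enumerate(grid):
--         grid[i] = list(row)
--
--     def dfs(i, j) -> int:
--         if grid[i][j] == 'x':
--             return 0
--         count = 1
--
--         v = grid[i][j]
--         grid[i][j] = 'x'  # 标记删除
--         for dx, dy in [(-1, 0), (0, -1), (1, 0), (0, 1)]:
--             x = i + dx
--             y = j + dy
--             if 0 <= x < len(grid) and 0 <= y < len(grid[0]):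
--                 if v == '0' or v == grid[x][y]:
--                     count += dfs(x, y)
--         return count
--
--     for i in range(len(grid)):
--         for j in range(len(grid[0])):
--             if grid[i][j] == '0':
--                 dfs(i, j)
--             if i == 0 or i == len(grid) - 1 or j == 0 or j == len(grid[0]) - 1:
--                 dfs(i, j)
--
--     res = 0
--     for i in range(len(grid)):
--         for j in range(len(grid[0])):
--             if grid[i][j] != 'x':
--                 c = dfs(i, j)
--                 res = max(res, c)
--     return res
-- ===== SOURCE B (Python) =====
-- from typing import List
--
-- def largestArea(grid: List[str]) -> int:
--     # Same in-place conversion of rows to lists as the original (observable mutation).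
--     for i, row in enumerate(grid):
--         grid[i] = list(row)
--     rows = len(grid)
--
--     def flood(si, sj) -> int:
--         count = 0
--         stack = [(si, sj)]
--         while stack:
--             i, j = stack.pop()
--             if grid[i][j] == 'x':
--                 continue
--             count += 1
--             v = grid[i][j]
--             grid[i][j] = 'x'
--             for dx, dy in ((0, 1), (1, 0), (0, -1), (-1, 0)):
--                 x, y = i + dx, j + dy
--                 if 0 <= x < rows and 0 <= y < len(grid[0]) and (v == '0' or v == grid[x][y]):
--                     stack.append((x, y))
--         return count
--
--     for i in range(rows):
--         for j in range(len(grid[0])):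
--             if grid[i][j] == '0' or i == 0 or i == rows - 1 or j == 0 or j == len(grid[0]) - 1:
--                 flood(i, j)
--
--     res = 0
--     for i in range(rows):
--         for j in range(len(grid[0])):
--             if grid[i][j] != 'x':
--                 res = max(res, flood(i, j))
--     return res
-- ===== Notes on version B (the rewrite author's own statement) =====
-- stated objective: alternative
-- what changed: A's recursive dfs is replaced by an iterative flood fill with an explicit stack (pop a cell, skip if deleted, count, mark, push eligible neighbours), and A's two seeding ifs ('0' cell; boundary cell) are merged into one condition; B also cannot hit Python's recursion limit on large components.
import Mathlib
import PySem

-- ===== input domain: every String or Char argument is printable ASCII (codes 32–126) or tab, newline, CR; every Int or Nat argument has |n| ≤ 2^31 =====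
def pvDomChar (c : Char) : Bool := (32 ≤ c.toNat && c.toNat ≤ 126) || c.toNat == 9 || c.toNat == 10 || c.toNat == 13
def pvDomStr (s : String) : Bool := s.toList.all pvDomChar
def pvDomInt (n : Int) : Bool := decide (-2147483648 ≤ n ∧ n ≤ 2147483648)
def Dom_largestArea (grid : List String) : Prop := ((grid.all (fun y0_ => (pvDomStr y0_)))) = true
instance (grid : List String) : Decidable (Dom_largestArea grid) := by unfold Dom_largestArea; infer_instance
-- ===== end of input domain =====

-- B replaces A's recursive dfs by an iterative explicit-stack flood fill (and merges A's two
-- seeding ifs into one); return-value equivalence only: both Pythons mutate `grid` in place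
-- identically (each row replaced by the list of its characters).

-- Shared grid helpers (cell read / cell write / measures; both ports index the grid this way;
-- reads guarded in-bounds in both Pythons, so the 'x' default of gget is never consulted on Pre_).
def gget (g : List (List Char)) (i j : Int) : Char := (g.getD i.toNat []).getD j.toNat 'x'

def gset (g : List (List Char)) (i j : Int) (c : Char) : List (List Char) :=
  g.set i.toNat ((g.getD i.toNat []).set j.toNat c)

def unmarked (g : List (List Char)) : Nat :=
  (g.map (fun r => (r.filter (fun c => !(c == 'x'))).length)).sum

def sumlen (g : List (List Char)) : Nat := (g.map List.length).sum

-- termination helpers for runB (cited by its decreasing_by)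
theorem filt_set_lt (r : List Char) (j : Nat) (h : r.getD j 'x' ≠ 'x') :
    ((r.set j 'x').filter (fun c => !(c == 'x'))).length
      < (r.filter (fun c => !(c == 'x'))).length := by
  induction r generalizing j with
  | nil => simp [List.getD] at h
  | cons c t ih =>
    cases j with
    | zero =>
      simp only [List.getD_cons_zero] at h
      simp [List.set_cons_zero, h]
    | succ j =>
      simp only [List.getD_cons_succ] at h
      have := ih j h
      by_cases hc : c = 'x' <;> simp [List.set_cons_succ, hc] <;> omega

theorem unmarked_gset_lt (g : List (List Char)) (i j : Int) (h : gget g i j ≠ 'x') :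
    unmarked (gset g i j 'x') < unmarked g := by
  unfold gget at h
  unfold gset unmarked
  induction g generalizing i with
  | nil => simp [List.getD] at h
  | cons r t ih =>
    cases hi : i.toNat with
    | zero =>
      rw [hi] at h; simp only [List.getD_cons_zero] at h
      simp only [List.getD_cons_zero, List.set_cons_zero, List.map_cons, List.sum_cons]
      have := filt_set_lt r j.toNat h
      omega
    | succ n =>
      rw [hi] at h; simp only [List.getD_cons_succ] at h
      simp only [List.getD_cons_succ, List.set_cons_succ, List.map_cons, List.sum_cons]
      have h2 : (Int.ofNat n).toNat = n := rfl
      have := ih (Int.ofNat n) (by rw [h2]; exact h)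
      rw [h2] at this
      omega

-- ===== PORT A =====
-- literal port of A's recursive dfs; the Nat fuel is only a totality guard (each recursive call
-- below receives fuel > unmarked g, which the lemmas show is enough, so it never runs out).
def dfsA (rows cols : Int) : Nat → Int → Int → List (List Char) → Int × List (List Char)
  | 0, _, _, g => (0, g)
  | fuel + 1, i, j, g =>
    if gget g i j = 'x' then (0, g)
    else
      let v := gget g i j
      let g1 := gset g i j 'x'
      ([((-1 : Int), (0 : Int)), (0, -1), (1, 0), (0, 1)]).foldl
        (fun (st : Int × List (List Char)) d =>
          if 0 ≤ i + d.1 ∧ i + d.1 < rows ∧ 0 ≤ j + d.2 ∧ j + d.2 < cols then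
            if v = '0' ∨ gget st.2 (i + d.1) (j + d.2) = v then
              let r := dfsA rows cols fuel (i + d.1) (j + d.2) st.2
              (st.1 + r.1, r.2)
            else st
          else st)
        (1, g1)

def largestArea (grid : List String) : Int :=
  let g0 := grid.map (fun row => row.toList)
  let rows : Int := g0.length
  let cols : Int := (g0.headD []).length
  let F : Nat := sumlen g0 + 1
  let g1 := (PySem.List.pyRange 0 rows 1).foldl (fun g i =>
    (PySem.List.pyRange 0 cols 1).foldl (fun g j =>
      let g' := if gget g i j = '0' then (dfsA rows cols F i j g).2 else g
      if i = 0 ∨ i = rows - 1 ∨ j = 0 ∨ j = cols - 1 then (dfsA rows cols F i j g').2 else g') g) g0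
  ((PySem.List.pyRange 0 rows 1).foldl (fun (st : Int × List (List Char)) i =>
    (PySem.List.pyRange 0 cols 1).foldl (fun (st : Int × List (List Char)) j =>
      if gget st.2 i j ≠ 'x' then
        let r := dfsA rows cols F i j st.2
        (max st.1 r.1, r.2)
      else st) st) ((0 : Int), g1)).1

-- ===== PORT B =====
-- literal port of B's iterative flood: while stack: pop; skip 'x'; count; mark; push neighbours.
def runB (rows cols : Int) (stack : List (Int × Int)) (g : List (List Char)) :
    Int × List (List Char) :=
  match stack with
  | [] => (0, g)
  | (i, j) :: rest =>
    if h : gget g i j = 'x' then runB rows cols rest g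
    else
      let v := gget g i j
      let g1 := gset g i j 'x'
      let stk := ([((0 : Int), (1 : Int)), (1, 0), (0, -1), (-1, 0)]).foldl
        (fun st (d : Int × Int) =>
          if 0 ≤ i + d.1 ∧ i + d.1 < rows ∧ 0 ≤ j + d.2 ∧ j + d.2 < cols ∧
              (v = '0' ∨ gget g1 (i + d.1) (j + d.2) = v) then
            (i + d.1, j + d.2) :: st
          else st) rest
      let r := runB rows cols stk g1
      (r.1 + 1, r.2)
termination_by (unmarked g, stack.length)
decreasing_by
  · exact Prod.Lex.right _ (Nat.lt_succ_self _)
  · exact Prod.Lex.left _ _ (unmarked_gset_lt g i j h)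

def largestArea_alt (grid : List String) : Int :=
  let g0 := grid.map (fun row => row.toList)
  let rows : Int := g0.length
  let cols : Int := (g0.headD []).length
  let g1 := (PySem.List.pyRange 0 rows 1).foldl (fun g i =>
    (PySem.List.pyRange 0 cols 1).foldl (fun g j =>
      if gget g i j = '0' ∨ i = 0 ∨ i = rows - 1 ∨ j = 0 ∨ j = cols - 1 then
        (runB rows cols [(i, j)] g).2
      else g) g) g0
  ((PySem.List.pyRange 0 rows 1).foldl (fun (st : Int × List (List Char)) i =>
    (PySem.List.pyRange 0 cols 1).foldl (fun (st : Int × List (List Char)) j =>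
      if gget st.2 i j ≠ 'x' then
        let r := runB rows cols [(i, j)] st.2
        (max st.1 r.1, r.2)
      else st) st) ((0 : Int), g1)).1

-- ===== PRECONDITION & SPEC =====
-- Pre_ excludes exactly the grids on which Python A raises IndexError: a row strictly shorter
-- than row 0 is always indexed at a column ≥ its own length by the seeding loop.
def Pre_largestArea (grid : List String) : Prop :=
  ∀ s ∈ grid, (grid.headD "").toList.length ≤ s.toList.length
instance (grid : List String) : Decidable (Pre_largestArea grid) := by
  unfold Pre_largestArea; infer_instance

def pvWitness_largestArea : List String := ["ab", "ab"]

def Spec_largestArea (grid : List String) (out : Int) : Prop := out = largestArea_alt grid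
instance (grid : List String) (out : Int) : Decidable (Spec_largestArea grid out) := by
  unfold Spec_largestArea; infer_instance

-- ===== CLAIM (what is proved, stated in full; the proofs are below) =====
def Claim_equal_largestArea : Prop :=
  ∀ (grid : List String), Dom_largestArea grid → Pre_largestArea grid →
    Spec_largestArea grid (largestArea grid)

-- ===== LEMMAS AND PROOFS =====

-- proof-only abbreviations (small names keep the proof terms small)
def pushCond (rows cols i j : Int) (g : List (List Char)) (d : Int × Int) : Bool :=
  decide (0 ≤ i + d.1 ∧ i + d.1 < rows ∧ 0 ≤ j + d.2 ∧ j + d.2 < cols ∧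
    (gget g i j = '0' ∨ gget (gset g i j 'x') (i + d.1) (j + d.2) = gget g i j))

def pushList (rows cols i j : Int) (g : List (List Char)) (ds : List (Int × Int)) :
    List (Int × Int) :=
  (ds.filter (pushCond rows cols i j g)).map (fun d => (i + d.1, j + d.2))

def dirsL : List (Int × Int) := [(-1, 0), (0, -1), (1, 0), (0, 1)]

theorem pushList_nil (rows cols i j : Int) (g : List (List Char)) :
    pushList rows cols i j g [] = [] := rfl

theorem pushList_cons_true (rows cols i j : Int) (g : List (List Char)) (d : Int × Int)
    (ds : List (Int × Int)) (h : pushCond rows cols i j g d = true) :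
    pushList rows cols i j g (d :: ds) =
      (i + d.1, j + d.2) :: pushList rows cols i j g ds := by
  unfold pushList
  rw [List.filter_cons, if_pos h, List.map_cons]

theorem pushList_cons_false (rows cols i j : Int) (g : List (List Char)) (d : Int × Int)
    (ds : List (Int × Int)) (h : pushCond rows cols i j g d = false) :
    pushList rows cols i j g (d :: ds) = pushList rows cols i j g ds := by
  unfold pushList
  rw [List.filter_cons, if_neg (by simp [h])]


theorem getD_default_of_le {α : Type} {l : List α} {n : Nat} (d : α) (h : l.length ≤ n) :
    l.getD n d = d := by
  rw [List.getD_eq_getElem?_getD, List.getElem?_eq_none h]; rfl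

theorem gget_bounds {g : List (List Char)} {i j : Int} (h : gget g i j ≠ 'x') :
    i.toNat < g.length ∧ j.toNat < (g.getD i.toNat []).length := by
  unfold gget at h
  constructor
  · by_contra hh
    rw [Nat.not_lt] at hh
    rw [getD_default_of_le [] hh] at h
    simp [List.getD] at h
  · by_contra hh
    rw [Nat.not_lt] at hh
    rw [getD_default_of_le 'x' hh] at h
    exact h rfl

theorem gget_congr (g : List (List Char)) {a b i j : Int}
    (h1 : a.toNat = i.toNat) (h2 : b.toNat = j.toNat) : gget g a b = gget g i j := by
  unfold gget; rw [h1, h2]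

theorem getD_set_self {α : Type} (l : List α) (n : Nat) (a d : α) (h : n < l.length) :
    (l.set n a).getD n d = a := by
  rw [List.getD_eq_getElem?_getD, List.getElem?_set_self h, Option.getD_some]

theorem getD_set_ne {α : Type} (l : List α) {m n : Nat} (a d : α) (h : m ≠ n) :
    (l.set m a).getD n d = l.getD n d := by
  rw [List.getD_eq_getElem?_getD, List.getElem?_set_ne h, ← List.getD_eq_getElem?_getD]

theorem gget_gset_self {g : List (List Char)} {i j : Int} (h : gget g i j ≠ 'x') (c : Char) :
    gget (gset g i j c) i j = c := by
  obtain ⟨h1, h2⟩ := gget_bounds h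
  unfold gget gset
  rw [getD_set_self g i.toNat _ [] h1, getD_set_self _ j.toNat _ 'x' h2]

theorem gget_gset_other {g : List (List Char)} {i j a b : Int} (c : Char)
    (h : a.toNat ≠ i.toNat ∨ b.toNat ≠ j.toNat) :
    gget (gset g i j c) a b = gget g a b := by
  unfold gget gset
  rcases h with h | h
  · rw [getD_set_ne g _ [] (Ne.symm h)]
  · by_cases hi : a.toNat = i.toNat
    · by_cases hl : i.toNat < g.length
      · rw [hi, getD_set_self g i.toNat _ [] hl, getD_set_ne _ _ 'x' (Ne.symm h)]
      · rw [List.set_eq_of_length_le (Nat.le_of_not_lt hl), hi]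
    · rw [getD_set_ne g _ [] (fun hh => hi hh.symm)]

def Evol (g g' : List (List Char)) : Prop :=
  ∀ i j : Int, gget g' i j = gget g i j ∨ gget g' i j = 'x'

theorem Evol_refl (g : List (List Char)) : Evol g g := fun _ _ => Or.inl rfl

theorem Evol_trans {a b c : List (List Char)} (h1 : Evol a b) (h2 : Evol b c) : Evol a c := by
  intro i j
  rcases h2 i j with h | h
  · rcases h1 i j with h' | h'
    · exact Or.inl (h.trans h')
    · exact Or.inr (h.trans h')
  · exact Or.inr h

theorem Evol_gset {g : List (List Char)} {i j : Int} (h : gget g i j ≠ 'x') :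
    Evol g (gset g i j 'x') := by
  intro a b
  by_cases hc : a.toNat = i.toNat ∧ b.toNat = j.toNat
  · right
    rw [gget_congr _ hc.1 hc.2]
    exact gget_gset_self h 'x'
  · left
    rw [gget_gset_other 'x' (by tauto)]

theorem sumlen_gset (g : List (List Char)) (i j : Int) (c : Char) :
    sumlen (gset g i j c) = sumlen g := by
  unfold sumlen gset
  induction g generalizing i with
  | nil => rfl
  | cons r t ih =>
    cases hn : i.toNat with
    | zero => simp [List.set_cons_zero]
    | succ n =>
      simp only [List.getD_cons_succ, List.set_cons_succ, List.map_cons, List.sum_cons]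
      have h2 : (Int.ofNat n).toNat = n := rfl
      have := ih (Int.ofNat n)
      rw [h2] at this
      omega

theorem unmarked_le_sumlen (g : List (List Char)) : unmarked g ≤ sumlen g := by
  unfold unmarked sumlen
  induction g with
  | nil => simp
  | cons r t ih =>
    simp only [List.map_cons, List.sum_cons]
    have := List.length_filter_le (fun c : Char => !(c == 'x')) r
    omega

-- push loop over the 4 direction literals: cons-accumulation equals filter-map onto the rest
theorem push_eq {β : Type} (C : Int × Int → Prop) [DecidablePred C] (f : Int × Int → β)
    (a b c d : Int × Int) (rest : List β) :
    [a, b, c, d].foldl (fun st x => if C x then f x :: st else st) rest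
      = ((([d, c, b, a]).filter (fun x => decide (C x))).map f) ++ rest := by
  by_cases ha : C a <;> by_cases hb : C b <;> by_cases hc : C c <;> by_cases hd : C d <;>
    simp [ha, hb, hc, hd]

theorem runB_nil (rows cols : Int) (g : List (List Char)) : runB rows cols [] g = (0, g) := by
  rw [runB]

theorem runB_cons_x (rows cols i j : Int) (rest : List (Int × Int)) (g : List (List Char))
    (h : gget g i j = 'x') :
    runB rows cols ((i, j) :: rest) g = runB rows cols rest g := by
  rw [runB]; simp [h]

theorem runB_cons_nx (rows cols i j : Int) (rest : List (Int × Int)) (g : List (List Char))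
    (h : ¬ gget g i j = 'x') :
    runB rows cols ((i, j) :: rest) g =
      ((runB rows cols (pushList rows cols i j g dirsL ++ rest) (gset g i j 'x')).1 + 1,
       (runB rows cols (pushList rows cols i j g dirsL ++ rest) (gset g i j 'x')).2) := by
  conv_lhs => rw [runB]
  simp only [dif_neg h]
  rw [push_eq (fun d : Int × Int =>
      0 ≤ i + d.1 ∧ i + d.1 < rows ∧ 0 ≤ j + d.2 ∧ j + d.2 < cols ∧
        (gget g i j = '0' ∨ gget (gset g i j 'x') (i + d.1) (j + d.2) = gget g i j))
    (fun d => (i + d.1, j + d.2))]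
  rfl

theorem runB_append (rows cols : Int) (n : Nat) :
    ∀ (g : List (List Char)), unmarked g ≤ n →
      ∀ (s1 s2 : List (Int × Int)),
        runB rows cols (s1 ++ s2) g =
          ((runB rows cols s1 g).1 + (runB rows cols s2 (runB rows cols s1 g).2).1,
           (runB rows cols s2 (runB rows cols s1 g).2).2) := by
  induction n with
  | zero =>
    intro g hg s1 s2
    induction s1 with
    | nil => simp [runB_nil]
    | cons p t ih =>
      obtain ⟨i, j⟩ := p
      by_cases h : gget g i j = 'x'
      · rw [List.cons_append, runB_cons_x rows cols i j _ g h, runB_cons_x rows cols i j _ g h]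
        exact ih
      · exact absurd (unmarked_gset_lt g i j h) (by omega)
  | succ n ihn =>
    intro g hg s1 s2
    induction s1 with
    | nil => simp [runB_nil]
    | cons p t ih =>
      obtain ⟨i, j⟩ := p
      by_cases h : gget g i j = 'x'
      · rw [List.cons_append, runB_cons_x rows cols i j _ g h, runB_cons_x rows cols i j _ g h]
        exact ih
      · rw [List.cons_append, runB_cons_nx rows cols i j _ g h, runB_cons_nx rows cols i j t g h]
        have h1 : unmarked (gset g i j 'x') ≤ n := by
          have := unmarked_gset_lt g i j h; omega
        rw [← List.append_assoc]
        rw [ihn (gset g i j 'x') h1 _ s2]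
        simp only [Prod.mk.injEq]
        exact ⟨by omega, by trivial⟩

theorem runB_props (rows cols : Int) (n : Nat) :
    ∀ (g : List (List Char)), unmarked g ≤ n → ∀ (s : List (Int × Int)),
      Evol g (runB rows cols s g).2 ∧ unmarked (runB rows cols s g).2 ≤ unmarked g ∧
        sumlen (runB rows cols s g).2 = sumlen g := by
  induction n with
  | zero =>
    intro g hg s
    induction s with
    | nil => rw [runB_nil]; exact ⟨Evol_refl g, le_refl _, rfl⟩
    | cons p t ih =>
      obtain ⟨i, j⟩ := p
      by_cases h : gget g i j = 'x'
      · rw [runB_cons_x rows cols i j t g h]; exact ih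
      · exact absurd (unmarked_gset_lt g i j h) (by omega)
  | succ n ihn =>
    intro g hg s
    induction s with
    | nil => rw [runB_nil]; exact ⟨Evol_refl g, le_refl _, rfl⟩
    | cons p t ih =>
      obtain ⟨i, j⟩ := p
      by_cases h : gget g i j = 'x'
      · rw [runB_cons_x rows cols i j t g h]; exact ih
      · rw [runB_cons_nx rows cols i j t g h]
        have hlt := unmarked_gset_lt g i j h
        have h1 : unmarked (gset g i j 'x') ≤ n := by omega
        refine ⟨?_, ?_, ?_⟩
        · simpa using Evol_trans (Evol_gset h) (ihn _ h1 _).1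
        · simpa using le_trans (ihn _ h1 _).2.1 (le_of_lt hlt)
        · simpa using ((ihn _ h1 _).2.2).trans (sumlen_gset g i j 'x')

theorem runB_evol (rows cols : Int) (s : List (Int × Int)) (g : List (List Char)) :
    Evol g (runB rows cols s g).2 :=
  (runB_props rows cols (unmarked g) g (le_refl _) s).1

theorem unmarked_runB_le (rows cols : Int) (s : List (Int × Int)) (g : List (List Char)) :
    unmarked (runB rows cols s g).2 ≤ unmarked g :=
  (runB_props rows cols (unmarked g) g (le_refl _) s).2.1

theorem sumlen_runB (rows cols : Int) (s : List (Int × Int)) (g : List (List Char)) :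
    sumlen (runB rows cols s g).2 = sumlen g :=
  (runB_props rows cols (unmarked g) g (le_refl _) s).2.2

theorem gget_runB_cons_self (rows cols i j : Int) (s : List (Int × Int))
    (g : List (List Char)) : gget (runB rows cols ((i, j) :: s) g).2 i j = 'x' := by
  by_cases h : gget g i j = 'x'
  · rw [runB_cons_x rows cols i j s g h]
    rcases runB_evol rows cols s g i j with h' | h'
    · rw [h']; exact h
    · exact h'
  · rw [runB_cons_nx rows cols i j s g h]
    have hg1 : gget (gset g i j 'x') i j = 'x' := gget_gset_self h 'x'
    rcases runB_evol rows cols _ (gset g i j 'x') i j with h' | h'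
    · rw [h']; exact hg1
    · exact h'

theorem dfsA_eq_runB (rows cols : Int) :
    ∀ (fuel : Nat) (g : List (List Char)) (i j : Int), unmarked g < fuel →
      dfsA rows cols fuel i j g = runB rows cols [(i, j)] g := by
  intro fuel
  induction fuel with
  | zero => intro g i j h; omega
  | succ f ihf =>
    intro g i j hfu
    by_cases h : gget g i j = 'x'
    · rw [runB_cons_x rows cols i j [] g h, runB_nil]
      simp [dfsA, h]
    · have hvx : gget g i j ≠ 'x' := h
      have aux : ∀ (ds : List (Int × Int)) (acc : Int) (g' : List (List Char)),
          Evol (gset g i j 'x') g' → unmarked g' ≤ unmarked (gset g i j 'x') →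
          (ds.foldl (fun (st : Int × List (List Char)) d =>
              if 0 ≤ i + d.1 ∧ i + d.1 < rows ∧ 0 ≤ j + d.2 ∧ j + d.2 < cols then
                if gget g i j = '0' ∨ gget st.2 (i + d.1) (j + d.2) = gget g i j then
                  let r := dfsA rows cols f (i + d.1) (j + d.2) st.2
                  (st.1 + r.1, r.2)
                else st
              else st) (acc, g'))
            = (acc + (runB rows cols (pushList rows cols i j g ds) g').1,
               (runB rows cols (pushList rows cols i j g ds) g').2) := by
        intro ds
        induction ds with
        | nil => intro acc g' _ _; rw [pushList_nil, runB_nil]; simp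
        | cons d ds ih =>
          intro acc g' hE hU
          have hfu' : unmarked g' < f := by
            have h1 := unmarked_gset_lt g i j hvx
            omega
          simp only [List.foldl_cons]
          by_cases hin : 0 ≤ i + d.1 ∧ i + d.1 < rows ∧ 0 ≤ j + d.2 ∧ j + d.2 < cols
          · by_cases hcnd : gget g i j = '0' ∨
                gget (gset g i j 'x') (i + d.1) (j + d.2) = gget g i j
            · have hC : pushCond rows cols i j g d = true := by
                unfold pushCond
                exact decide_eq_true ⟨hin.1, hin.2.1, hin.2.2.1, hin.2.2.2, hcnd⟩
              rw [if_pos hin, pushList_cons_true rows cols i j g d ds hC]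
              by_cases hAc : gget g i j = '0' ∨ gget g' (i + d.1) (j + d.2) = gget g i j
              · rw [if_pos hAc]
                rw [ihf g' (i + d.1) (j + d.2) hfu']
                set rB := runB rows cols [(i + d.1, j + d.2)] g' with hrB
                have hE2 : Evol (gset g i j 'x') rB.2 :=
                  Evol_trans hE (runB_evol rows cols _ g')
                have hU2 : unmarked rB.2 ≤ unmarked (gset g i j 'x') :=
                  le_trans (unmarked_runB_le rows cols _ g') hU
                rw [ih (acc + rB.1) rB.2 hE2 hU2]
                have happ := runB_append rows cols (unmarked g') g' (le_refl _)
                  [(i + d.1, j + d.2)] (pushList rows cols i j g ds)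
                rw [List.singleton_append] at happ
                rw [happ, ← hrB]
                simp only [Prod.mk.injEq]
                exact ⟨by omega, by trivial⟩
              · rcases hcnd with h0 | hveq
                · exact absurd (Or.inl h0) hAc
                rcases hE (i + d.1) (j + d.2) with he | he
                · exact absurd (Or.inr (he.trans hveq)) hAc
                · rw [if_neg hAc, runB_cons_x rows cols (i + d.1) (j + d.2) _ g' he]
                  exact ih acc g' hE hU
            · have hC : pushCond rows cols i j g d = false := by
                unfold pushCond
                exact decide_eq_false (fun hfull => hcnd hfull.2.2.2.2)
              rw [pushList_cons_false rows cols i j g d ds hC, if_pos hin]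
              rw [not_or] at hcnd
              have hAc : ¬ (gget g i j = '0' ∨ gget g' (i + d.1) (j + d.2) = gget g i j) := by
                rw [not_or]
                refine ⟨hcnd.1, ?_⟩
                rcases hE (i + d.1) (j + d.2) with he | he
                · rw [he]; exact hcnd.2
                · rw [he]; exact fun hx => hvx hx.symm
              rw [if_neg hAc]
              exact ih acc g' hE hU
          · have hC : pushCond rows cols i j g d = false := by
              unfold pushCond
              exact decide_eq_false
                (fun hfull => hin ⟨hfull.1, hfull.2.1, hfull.2.2.1, hfull.2.2.2.1⟩)
            rw [pushList_cons_false rows cols i j g d ds hC, if_neg hin]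
            exact ih acc g' hE hU
      calc dfsA rows cols (f + 1) i j g
          = (dirsL.foldl
              (fun (st : Int × List (List Char)) d =>
                if 0 ≤ i + d.1 ∧ i + d.1 < rows ∧ 0 ≤ j + d.2 ∧ j + d.2 < cols then
                  if gget g i j = '0' ∨ gget st.2 (i + d.1) (j + d.2) = gget g i j then
                    let r := dfsA rows cols f (i + d.1) (j + d.2) st.2
                    (st.1 + r.1, r.2)
                  else st
                else st) (1, gset g i j 'x')) := by
            simp only [dfsA, if_neg h]; rfl
        _ = runB rows cols [(i, j)] g := by
            rw [aux dirsL 1 (gset g i j 'x') (Evol_refl _) (le_refl _)]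
            rw [runB_cons_nx rows cols i j [] g h, List.append_nil]
            simp only [Prod.mk.injEq]
            exact ⟨by omega, by trivial⟩

theorem foldl_inv {α β : Type} (P : α → Prop) (f : α → β → α)
    (hf : ∀ a x, P a → P (f a x)) : ∀ (L : List β) (a : α), P a → P (L.foldl f a) := by
  intro L
  induction L with
  | nil => intro a ha; exact ha
  | cons x L ih => intro a ha; exact ih _ (hf a x ha)

theorem foldl_congr_inv {α β : Type} (P : α → Prop) (f1 f2 : α → β → α)
    (h12 : ∀ a x, P a → f1 a x = f2 a x) (hf : ∀ a x, P a → P (f2 a x)) :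
    ∀ (L : List β) (a : α), P a → L.foldl f1 a = L.foldl f2 a := by
  intro L
  induction L with
  | nil => intros; rfl
  | cons x L ih =>
    intro a ha
    simp only [List.foldl_cons]
    rw [h12 a x ha]
    exact ih _ (hf a x ha)

def stepA2 (rows cols : Int) (F : Nat) (g : List (List Char)) (i j : Int) :
    List (List Char) :=
  if i = 0 ∨ i = rows - 1 ∨ j = 0 ∨ j = cols - 1 then
    (dfsA rows cols F i j (if gget g i j = '0' then (dfsA rows cols F i j g).2 else g)).2
  else (if gget g i j = '0' then (dfsA rows cols F i j g).2 else g)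

def stepB2 (rows cols : Int) (g : List (List Char)) (i j : Int) : List (List Char) :=
  if gget g i j = '0' ∨ i = 0 ∨ i = rows - 1 ∨ j = 0 ∨ j = cols - 1 then
    (runB rows cols [(i, j)] g).2
  else g

def stepA3 (rows cols : Int) (F : Nat) (st : Int × List (List Char)) (i j : Int) :
    Int × List (List Char) :=
  if gget st.2 i j ≠ 'x' then
    (max st.1 (dfsA rows cols F i j st.2).1, (dfsA rows cols F i j st.2).2)
  else st

def stepB3 (rows cols : Int) (st : Int × List (List Char)) (i j : Int) :
    Int × List (List Char) :=
  if gget st.2 i j ≠ 'x' then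
    (max st.1 (runB rows cols [(i, j)] st.2).1, (runB rows cols [(i, j)] st.2).2)
  else st

theorem largestArea_eq_alt (grid : List String) : largestArea grid = largestArea_alt grid := by
  have main : ∀ (g0 : List (List Char)) (rows cols : Int) (F : Nat), F = sumlen g0 + 1 →
      ((PySem.List.pyRange 0 rows 1).foldl (fun st i =>
        (PySem.List.pyRange 0 cols 1).foldl (fun st j => stepA3 rows cols F st i j) st)
        ((0 : Int), (PySem.List.pyRange 0 rows 1).foldl (fun g i =>
          (PySem.List.pyRange 0 cols 1).foldl (fun g j => stepA2 rows cols F g i j) g) g0)).1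
      = ((PySem.List.pyRange 0 rows 1).foldl (fun st i =>
        (PySem.List.pyRange 0 cols 1).foldl (fun st j => stepB3 rows cols st i j) st)
        ((0 : Int), (PySem.List.pyRange 0 rows 1).foldl (fun g i =>
          (PySem.List.pyRange 0 cols 1).foldl (fun g j => stepB2 rows cols g i j) g) g0)).1 := by
    intro g0 rows cols F hF
    have hcell : ∀ (g : List (List Char)) (i j : Int), sumlen g = sumlen g0 →
        dfsA rows cols F i j g = runB rows cols [(i, j)] g := by
      intro g i j hs
      exact dfsA_eq_runB rows cols F g i j
        (by have := unmarked_le_sumlen g; omega)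
    have hcell2 : ∀ (g : List (List Char)) (i j : Int), sumlen g = sumlen g0 →
        stepA2 rows cols F g i j = stepB2 rows cols g i j := by
      intro g i j hs
      unfold stepA2 stepB2
      by_cases h0 : gget g i j = '0'
      · rw [if_pos h0, hcell g i j hs, if_pos (Or.inl h0)]
        by_cases hb : i = 0 ∨ i = rows - 1 ∨ j = 0 ∨ j = cols - 1
        · rw [if_pos hb]
          have hm : gget (runB rows cols [(i, j)] g).2 i j = 'x' :=
            gget_runB_cons_self rows cols i j [] g
          have hs' : sumlen (runB rows cols [(i, j)] g).2 = sumlen g0 := by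
            rw [sumlen_runB]; exact hs
          rw [hcell _ i j hs', runB_cons_x rows cols i j [] _ hm, runB_nil]
        · rw [if_neg hb]
      · rw [if_neg h0]
        by_cases hb : i = 0 ∨ i = rows - 1 ∨ j = 0 ∨ j = cols - 1
        · rw [if_pos hb, if_pos (Or.inr hb), hcell g i j hs]
        · rw [if_neg hb, if_neg (by tauto)]
    have hBpres : ∀ (g : List (List Char)) (i j : Int), sumlen g = sumlen g0 →
        sumlen (stepB2 rows cols g i j) = sumlen g0 := by
      intro g i j hs
      unfold stepB2
      by_cases hc : gget g i j = '0' ∨ i = 0 ∨ i = rows - 1 ∨ j = 0 ∨ j = cols - 1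
      · rw [if_pos hc, sumlen_runB]; exact hs
      · rw [if_neg hc]; exact hs
    have hinner2_pres : ∀ (g : List (List Char)) (i : Int), sumlen g = sumlen g0 →
        sumlen ((PySem.List.pyRange 0 cols 1).foldl
          (fun g j => stepB2 rows cols g i j) g) = sumlen g0 := by
      intro g i hs
      exact foldl_inv (fun g => sumlen g = sumlen g0) _ (fun g j hp => hBpres g i j hp) _ g hs
    have hphase2 : (PySem.List.pyRange 0 rows 1).foldl (fun g i =>
        (PySem.List.pyRange 0 cols 1).foldl (fun g j => stepA2 rows cols F g i j) g) g0
      = (PySem.List.pyRange 0 rows 1).foldl (fun g i =>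
        (PySem.List.pyRange 0 cols 1).foldl (fun g j => stepB2 rows cols g i j) g) g0 := by
      refine foldl_congr_inv (fun g => sumlen g = sumlen g0) _ _ ?_ ?_ _ g0 rfl
      · intro g i hp
        exact foldl_congr_inv (fun g => sumlen g = sumlen g0) _ _
          (fun g j hq => hcell2 g i j hq) (fun g j hq => hBpres g i j hq) _ g hp
      · intro g i hp
        exact hinner2_pres g i hp
    have hg1s : sumlen ((PySem.List.pyRange 0 rows 1).foldl (fun g i =>
        (PySem.List.pyRange 0 cols 1).foldl (fun g j => stepB2 rows cols g i j) g) g0)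
        = sumlen g0 :=
      foldl_inv (fun g => sumlen g = sumlen g0) _
        (fun g i hp => hinner2_pres g i hp) _ g0 rfl
    have hcell3 : ∀ (st : Int × List (List Char)) (i j : Int), sumlen st.2 = sumlen g0 →
        stepA3 rows cols F st i j = stepB3 rows cols st i j := by
      intro st i j hs
      unfold stepA3 stepB3
      by_cases hx : gget st.2 i j ≠ 'x'
      · rw [if_pos hx, if_pos hx, hcell st.2 i j hs]
      · rw [if_neg hx, if_neg hx]
    have hBpres3 : ∀ (st : Int × List (List Char)) (i j : Int), sumlen st.2 = sumlen g0 →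
        sumlen (stepB3 rows cols st i j).2 = sumlen g0 := by
      intro st i j hs
      unfold stepB3
      by_cases hx : gget st.2 i j ≠ 'x'
      · rw [if_pos hx]
        simpa [sumlen_runB] using hs
      · rw [if_neg hx]; exact hs
    have hphase3 : ∀ (st : Int × List (List Char)), sumlen st.2 = sumlen g0 →
        (PySem.List.pyRange 0 rows 1).foldl (fun st i =>
          (PySem.List.pyRange 0 cols 1).foldl (fun st j => stepA3 rows cols F st i j) st) st
        = (PySem.List.pyRange 0 rows 1).foldl (fun st i =>
          (PySem.List.pyRange 0 cols 1).foldl (fun st j => stepB3 rows cols st i j) st) st := by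
      intro st hs
      refine foldl_congr_inv (fun (st : Int × List (List Char)) => sumlen st.2 = sumlen g0)
        _ _ ?_ ?_ _ st hs
      · intro st i hp
        exact foldl_congr_inv (fun (st : Int × List (List Char)) => sumlen st.2 = sumlen g0)
          _ _ (fun st j hq => hcell3 st i j hq) (fun st j hq => hBpres3 st i j hq) _ st hp
      · intro st i hp
        exact foldl_inv (fun (st : Int × List (List Char)) => sumlen st.2 = sumlen g0) _
          (fun st j hq => hBpres3 st i j hq) _ st hp
    rw [hphase2]
    exact congrArg Prod.fst (hphase3 _ hg1s)
  exact main (grid.map (fun row => row.toList)) ((grid.map (fun row => row.toList)).length : Int)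
    (((grid.map (fun row => row.toList)).headD []).length : Int)
    (sumlen (grid.map (fun row => row.toList)) + 1) rfl

-- ===== VERDICT (by name: the statement is the Claim_ definition above) =====
theorem largestArea_spec : Claim_equal_largestArea := by
  intro grid _ _
  exact largestArea_eq_alt grid
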